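-- pv_equiv track=rewrite | github.com/rkdalsdn94/algoalgo | programmers/Lv2/모음_사전.py | solution
-- ===== SOURCE A (Python) =====
-- def solution(word):
--     answer = 0
--     word_list = ['A', 'E', 'I', 'O', 'U']
--     temp = [5 ** i for i in range(len(word_list))]
--
--     for i in range(len(word) - 1, -1, -1):
--         idx = word_list.index(word[i])
--
--         for j in range(5 - i):
--             answer += temp[j] * idx
--         answer += 1
--
--     return answer
-- ===== SOURCE B (Python) =====
-- def solution(word):
--     # Single flat pass with a precomputed positional weight table:
--     # weights[i] = 5**0 + ... + 5**(4-i), replacing A's inner re-summation loop.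
--     word_list = ['A', 'E', 'I', 'O', 'U']
--     weights = [781, 156, 31, 6, 1]
--     answer = 0
--     for i, ch in enumerate(word):
--         answer += word_list.index(ch) * weights[i] + 1
--     return answer
-- ===== Notes on version B (the rewrite author's own statement) =====
-- stated objective: simpler
-- what changed: Replaced the nested double loop (reverse index loop with an inner geometric re-summation) by one forward pass over enumerate(word) using a precomputed weight table [781,156,31,6,1].
-- outside the precondition, e.g. on solution('AAAAAA'): A returns 6, B raises IndexError
import Mathlib
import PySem

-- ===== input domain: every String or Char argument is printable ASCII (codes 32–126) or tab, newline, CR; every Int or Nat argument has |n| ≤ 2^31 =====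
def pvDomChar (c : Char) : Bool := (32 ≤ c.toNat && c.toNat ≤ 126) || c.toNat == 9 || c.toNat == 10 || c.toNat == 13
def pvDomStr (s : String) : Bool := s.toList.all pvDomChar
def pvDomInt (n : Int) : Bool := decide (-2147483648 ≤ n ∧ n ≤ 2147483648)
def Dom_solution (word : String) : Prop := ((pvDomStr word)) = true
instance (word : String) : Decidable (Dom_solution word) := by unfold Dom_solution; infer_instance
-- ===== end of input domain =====

-- B replaces A's nested double loop with one forward pass over enumerate(word) using a
-- precomputed positional weight table (simpler decomposition).

-- ===== PORT A =====
-- A's body, working on the word's character list (PySem string primitives are defined over toList).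
def solutionGo (l : List Char) : Int :=
  let wordList : List Char := ['A', 'E', 'I', 'O', 'U']
  let temp : List Int := (PySem.List.pyRange 0 (PySem.List.len wordList) 1).map (fun i => (5 : Int) ^ i.toNat)
  (PySem.List.pyRange (PySem.List.len l - 1) (-1) (-1)).foldl
    (fun answer i =>
      -- word_list.index(word[i]); none = ValueError, excluded by Pre_solution
      let idx : Int := ((PySem.List.index? wordList ((PySem.List.pyGet? l i).getD 'A')).getD 0 : Nat)
      let answer := (PySem.List.pyRange 0 (5 - i) 1).foldl
        (fun a j => a + (PySem.List.pyGetD temp j 0) * idx) answer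
      answer + 1) 0

def solution (word : String) : Int := solutionGo word.toList

-- ===== PORT B =====
-- B's body: one pass over enumerate(word) with the precomputed weight table.
def solutionAltGo (l : List Char) : Int :=
  let wordList : List Char := ['A', 'E', 'I', 'O', 'U']
  let weights : List Int := [781, 156, 31, 6, 1]
  (PySem.List.enumerate l 0).foldl
    (fun answer p =>
      -- word_list.index(ch) (ValueError) and weights[i] (IndexError) are excluded by Pre_solution
      answer + ((PySem.List.index? wordList p.2).getD 0 : Nat) * (PySem.List.pyGetD weights p.1 0) + 1) 0

def solution_alt (word : String) : Int := solutionAltGo word.toList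

-- ===== PRECONDITION & SPEC =====
-- Pre_ is the problem's stated domain (words of length ≤ 5 over AEIOU): outside it A raises ValueError
-- on any non-vowel character; on all-vowel words longer than 5 A still returns a value (each extra
-- character only adds 1) while B raises IndexError, so those out-of-domain words are excluded too.
def Pre_solution (word : String) : Prop :=
  word.toList.length ≤ 5 ∧ word.toList.all (fun c => (['A', 'E', 'I', 'O', 'U'] : List Char).contains c) = true
instance (word : String) : Decidable (Pre_solution word) := by unfold Pre_solution; infer_instance

def pvWitness_solution : String := "AEI"

def Spec_solution (word : String) (out : Int) : Prop := out = solution_alt word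
instance (word : String) (out : Int) : Decidable (Spec_solution word out) := by unfold Spec_solution; infer_instance

-- ===== CLAIM (what is proved, stated in full; the proofs are below) =====
def Claim_equal_solution : Prop := ∀ (word : String), Dom_solution word → Pre_solution word → Spec_solution word (solution word)

-- ===== LEMMAS AND PROOFS =====
set_option maxHeartbeats 1000000 in
theorem solutionGo_eq_alt (l : List Char) (hlen : l.length ≤ 5) :
    solutionGo l = solutionAltGo l := by
  rcases l with _ | ⟨a, l⟩ <;>
    [skip; rcases l with _ | ⟨b, l⟩] <;>
    [skip; skip; rcases l with _ | ⟨c, l⟩] <;>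
    [skip; skip; skip; rcases l with _ | ⟨d, l⟩] <;>
    [skip; skip; skip; skip; rcases l with _ | ⟨e, l⟩] <;>
    [skip; skip; skip; skip; skip; rcases l with _ | ⟨f, l⟩]
  case cons.cons.cons.cons.cons.cons => simp at hlen; omega
  all_goals
    unfold solutionGo solutionAltGo
  all_goals
    norm_num [PySem.List.pyRange_neg_one, PySem.List.pyRange_one, List.range_succ,
      PySem.List.enumerate_cons, PySem.List.enumerate_nil,
      PySem.List.pyGet?, PySem.List.pyIdx?, PySem.List.pyGetD,
      show Int.toNat 0 = 0 from rfl, show Int.toNat 1 = 1 from rfl,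
      show Int.toNat 2 = 2 from rfl, show Int.toNat 3 = 3 from rfl,
      show Int.toNat 4 = 4 from rfl, show Int.toNat 5 = 5 from rfl]
  all_goals try ring

-- ===== VERDICT (by name: the statement is the Claim_ definition above) =====
theorem solution_spec : Claim_equal_solution := by
  intro word _dom hpre
  unfold Spec_solution
  exact solutionGo_eq_alt word.toList hpre.1
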